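-- pv_equiv track=rewrite | github.com/mostafa-sadeghi/maryam_rahimi | __pycache__/past/ass3.py | findLowestPrice
-- ===== SOURCE A (Python) =====
-- def findLowestPrice(prices):
--     lowest_prices = []
--     lowest_price = prices[0][1]
--     for record in prices:
--         if record[1] == lowest_price:
--             lowest_prices.append(record)
--         elif record[1] < lowest_price:
--             lowest_price = record[1]
--             lowest_prices.clear()
--             lowest_prices.append(record)
--     countries = sorted([country[0] for country in lowest_prices])
--     return "\n".join(countries)
-- ===== SOURCE B (Python) =====
-- def findLowestPrice(prices):
--     lowest = prices[0][1]
--     for _, price in prices: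
--         if price < lowest:
--             lowest = price
--     countries = sorted(name for name, price in prices if price == lowest)
--     return "\n".join(countries)
-- ===== Notes on version B (the rewrite author's own statement) =====
-- stated objective: simpler
-- what changed: Replaces the fused min-tracking accumulator loop (with clear/append of whole records) by two plain passes: a min scan, then a comprehension filtering the names at the minimum price.
import Mathlib
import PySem

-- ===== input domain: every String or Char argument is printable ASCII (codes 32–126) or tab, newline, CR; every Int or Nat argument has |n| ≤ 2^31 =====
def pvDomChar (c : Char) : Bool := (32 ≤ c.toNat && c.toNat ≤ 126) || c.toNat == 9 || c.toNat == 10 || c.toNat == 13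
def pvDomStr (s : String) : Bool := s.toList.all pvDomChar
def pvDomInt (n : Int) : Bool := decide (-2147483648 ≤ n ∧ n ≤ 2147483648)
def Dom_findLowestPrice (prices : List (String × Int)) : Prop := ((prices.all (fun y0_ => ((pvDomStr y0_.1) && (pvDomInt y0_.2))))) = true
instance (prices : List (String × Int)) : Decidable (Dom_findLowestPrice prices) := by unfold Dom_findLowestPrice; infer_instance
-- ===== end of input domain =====

-- B replaces A's fused min-tracking accumulator loop by two plain passes (min scan, then filter of names); return values only, no mutation observable.

-- ===== PORT A =====
-- A's for-loop: state = (lowest_prices, lowest_price); branches in A's order.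
def findLowestPriceLoop : List (String × Int) → List (String × Int) → Int → (List (String × Int) × Int)
  | [], acc, low => (acc, low)
  | r :: rest, acc, low =>
    if r.2 == low then findLowestPriceLoop rest (acc ++ [r]) low
    else if r.2 < low then findLowestPriceLoop rest [r] r.2
    else findLowestPriceLoop rest acc low

def findLowestPrice (prices : List (String × Int)) : String :=
  match prices with
  | [] => ""          -- prices[0][1] raises IndexError in Python; excluded by Pre_
  | h :: _ =>
    let res := findLowestPriceLoop prices [] h.2
    let countries := PySem.List.sorted (res.1.map Prod.fst) (fun x => x) false
    PySem.Str.join "\n" countries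

-- ===== PORT B =====
def findLowestPrice_alt (prices : List (String × Int)) : String :=
  match prices with
  | [] => ""          -- prices[0][1] raises IndexError in Python; excluded by Pre_
  | h :: _ =>
    let lowest := prices.foldl (fun low r => if r.2 < low then r.2 else low) h.2
    let countries := PySem.List.sorted ((prices.filter (fun r => r.2 == lowest)).map Prod.fst) (fun x => x) false
    PySem.Str.join "\n" countries

-- ===== PRECONDITION & SPEC =====
-- A raises IndexError on the empty list (prices[0][1]); B raises identically, so the empty list is excluded.
def Pre_findLowestPrice (prices : List (String × Int)) : Prop := prices ≠ []
instance (prices : List (String × Int)) : Decidable (Pre_findLowestPrice prices) := by unfold Pre_findLowestPrice; infer_instance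
def pvWitness_findLowestPrice : (List (String × Int)) := [("chile", 3), ("peru", 2), ("cuba", 2)]

def Spec_findLowestPrice (prices : List (String × Int)) (out : String) : Prop := out = findLowestPrice_alt prices
instance (prices : List (String × Int)) (out : String) : Decidable (Spec_findLowestPrice prices out) := by unfold Spec_findLowestPrice; infer_instance

-- ===== CLAIM (what is proved, stated in full; the proofs are below) =====
def Claim_equal_findLowestPrice : Prop := ∀ (prices : List (String × Int)), Dom_findLowestPrice prices → Pre_findLowestPrice prices → Spec_findLowestPrice prices (findLowestPrice prices)

-- ===== LEMMAS AND PROOFS =====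

-- the running minimum never exceeds its seed
theorem pv_min_le (rest : List (String × Int)) (low : Int) :
    rest.foldl (fun l r => if r.2 < l then r.2 else l) low ≤ low := by
  induction rest generalizing low with
  | nil => simp
  | cons r rest ih =>
    simp only [List.foldl_cons]
    split
    · exact le_trans (ih _) (by omega)
    · exact ih _

theorem pv_loop_spec (rest : List (String × Int)) (acc : List (String × Int)) (low : Int) :
    findLowestPriceLoop rest acc low =
      ((if low = rest.foldl (fun l r => if r.2 < l then r.2 else l) low then acc else [])
         ++ rest.filter (fun r => r.2 == rest.foldl (fun l r => if r.2 < l then r.2 else l) low),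
       rest.foldl (fun l r => if r.2 < l then r.2 else l) low) := by
  induction rest generalizing acc low with
  | nil => simp [findLowestPriceLoop]
  | cons r rest ih =>
    simp only [findLowestPriceLoop, List.foldl_cons, List.filter_cons]
    by_cases h1 : r.2 = low
    · simp only [h1, beq_self_eq_true, if_true, ih]
      by_cases h2 : low = rest.foldl (fun l r => if r.2 < l then r.2 else l) low
      · simp [← h2]
      · simp [if_neg h2, beq_eq_false_iff_ne.2 h2]
    · have hb : (r.2 == low) = false := beq_eq_false_iff_ne.2 h1
      simp only [hb, Bool.false_eq_true, if_false]
      by_cases h3 : r.2 < low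
      · have e1 : (if r.2 < low then r.2 else low) = r.2 := if_pos h3
        simp only [e1, if_pos h3, ih]
        have hle := pv_min_le rest r.2
        rw [if_neg (by omega : ¬ low = rest.foldl (fun l r => if r.2 < l then r.2 else l) r.2)]
        by_cases h4 : r.2 = rest.foldl (fun l r => if r.2 < l then r.2 else l) r.2
        · simp [← h4]
        · simp [if_neg h4, beq_eq_false_iff_ne.2 h4]
      · have e1 : (if r.2 < low then r.2 else low) = low := if_neg h3
        simp only [e1, if_neg h3, ih]
        have hle := pv_min_le rest low
        have hne : ¬ r.2 = rest.foldl (fun l r => if r.2 < l then r.2 else l) low := by omega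
        simp [beq_eq_false_iff_ne.2 hne]

-- ===== VERDICT (by name: the statement is the Claim_ definition above) =====
theorem findLowestPrice_spec : Claim_equal_findLowestPrice := by
  intro prices _ hpre
  unfold Spec_findLowestPrice findLowestPrice findLowestPrice_alt
  match prices with
  | [] => exact absurd rfl hpre
  | h :: t =>
    simp only [pv_loop_spec]
    split
    · rfl
    · rfl
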